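-- pv_equiv track=rewrite | github.com/btownshend/pyTecan | Experiment/worklist.py | wellSelection
-- ===== SOURCE A (Python) =====
-- def wellSelection(nx,ny,pos):
--     """Build a well selection string"""
--     s="%02x%02x"%(nx,ny)
--     vals=[0] * (7*((nx*ny+6)//7))
--     for i in pos:
--         vals[i]=1
--     bitCounter=0
--     bitMask=0
--     for i in range(len(vals)):
--         if vals[i]:
--             bitMask=bitMask | (1<<bitCounter)
--         bitCounter=bitCounter+1
--         if bitCounter>6:
--             s=s+chr(0x30+bitMask)
--             bitCounter=0
--             bitMask=0
--     if bitCounter>0: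
--         s=s+chr(0x30+bitMask)
--     return s
-- ===== SOURCE B (Python) =====
-- def wellSelection(nx, ny, pos):
--     """Build a well selection string"""
--     ngroups = (nx * ny + 6) // 7
--     masks = {}
--     for i in pos:
--         g, b = divmod(i, 7)
--         masks[g] = masks.get(g, 0) | (1 << b)
--     return "%02x%02x" % (nx, ny) + ''.join(chr(0x30 + masks.get(g, 0)) for g in range(ngroups))
-- ===== Notes on version B (the rewrite author's own statement) =====
-- stated objective: alternative
-- what changed: Replaces A's dense padded 0/1 array scanned slot-by-slot with a bitCounter/bitMask state machine by arithmetic grouping: divmod(i,7) buckets each position into a sparse dict of per-group bitmasks that is read out once per output character; Pre_ restricts to the natural domain of non-negative in-range well positions, since A accepts negative in-range positions only through Python's accidental negative list indexing (and raises IndexError out of range).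
-- outside the precondition, e.g. on wellSelection(1, 7, [-1]): A returns '0107p', B returns '01070'
import Mathlib
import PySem

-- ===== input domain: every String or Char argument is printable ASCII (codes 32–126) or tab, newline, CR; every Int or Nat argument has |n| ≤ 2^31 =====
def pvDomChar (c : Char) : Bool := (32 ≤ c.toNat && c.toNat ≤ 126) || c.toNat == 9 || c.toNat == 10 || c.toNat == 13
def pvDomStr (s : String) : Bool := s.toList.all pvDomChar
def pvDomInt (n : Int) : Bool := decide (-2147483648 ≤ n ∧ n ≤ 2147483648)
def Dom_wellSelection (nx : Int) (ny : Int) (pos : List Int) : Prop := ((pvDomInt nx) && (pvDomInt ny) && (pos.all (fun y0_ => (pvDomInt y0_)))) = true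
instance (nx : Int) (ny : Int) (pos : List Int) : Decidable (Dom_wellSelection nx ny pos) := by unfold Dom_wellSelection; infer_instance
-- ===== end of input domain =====

-- B groups the selected positions arithmetically (divmod by 7) into a sparse dict of
-- per-group bitmasks instead of scanning a dense padded 0/1 array with a bit-counter
-- state machine (objective: alternative, same cost).

-- shared helper: Python's '%02x' % n (lowercase hex, zero-padded to width 2, sign included in the width)
def pvFmt02x (n : Int) : String :=
  let ds := Nat.toDigits 16 n.natAbs
  if n < 0 then String.ofList ('-' :: (List.replicate (2 - (ds.length + 1)) '0' ++ ds))
  else String.ofList (List.replicate (2 - ds.length) '0' ++ ds)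

-- ===== PORT A =====
def wellSelection (nx : Int) (ny : Int) (pos : List Int) : String :=
  let s := pvFmt02x nx ++ pvFmt02x ny
  let vals0 : List Int := List.replicate (7 * PySem.Int.floordiv (nx * ny + 6) 7).toNat 0
  let vals := pos.foldl (fun l i => PySem.List.pySetD l i 1) vals0
  let st :=
    (PySem.List.pyRange 0 (vals.length : Int) 1).foldl
      (fun (acc : String × Nat × Nat) i =>
        let bitMask := if PySem.List.pyGetD vals i 0 ≠ 0 then acc.2.2 ||| (1 <<< acc.2.1) else acc.2.2
        let bitCounter := acc.2.1 + 1
        if 6 < bitCounter then (acc.1.push (Char.ofNat (0x30 + bitMask)), 0, 0)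
        else (acc.1, bitCounter, bitMask))
      (s, 0, 0)
  if 0 < st.2.1 then st.1.push (Char.ofNat (0x30 + st.2.2)) else st.1

-- ===== PORT B =====
-- g, b = divmod(i, 7); the mask values are small non-negative ints, kept as Nat
-- ('1 << b' with b = i % 7 ∈ [0,7), so '.toNat' on the shift amount is exact).
def wellSelection_alt (nx : Int) (ny : Int) (pos : List Int) : String :=
  let ngroups := PySem.Int.floordiv (nx * ny + 6) 7
  let masks : PySem.Dict Int Nat :=
    pos.foldl (fun d i =>
      PySem.Dict.insert d (PySem.Int.floordiv i 7)
        ((PySem.Dict.getD d (PySem.Int.floordiv i 7) 0) ||| (1 <<< (PySem.Int.mod i 7).toNat)))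
      PySem.Dict.empty
  (pvFmt02x nx ++ pvFmt02x ny) ++
    String.ofList ((PySem.List.pyRange 0 ngroups 1).map
      (fun g => Char.ofNat (0x30 + PySem.Dict.getD masks g 0)))

-- ===== PRECONDITION & SPEC =====
-- Pre_ keeps the natural domain of well positions: non-negative indices below the padded
-- grid size L = 7*((nx*ny+6)//7).  A raises IndexError outside [-L, L), and accepts a
-- negative in-range position only through Python's accidental negative list indexing
-- (vals[i]=1 wraps from the end), which B's arithmetic grouping does not reproduce.
def Pre_wellSelection (nx : Int) (ny : Int) (pos : List Int) : Prop :=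
  ∀ i ∈ pos, 0 ≤ i ∧ i < 7 * PySem.Int.floordiv (nx * ny + 6) 7
instance (nx : Int) (ny : Int) (pos : List Int) : Decidable (Pre_wellSelection nx ny pos) := by unfold Pre_wellSelection; infer_instance

def pvWitness_wellSelection : Int × Int × List Int := (8, 12, [0, 5, 95])

def Spec_wellSelection (nx : Int) (ny : Int) (pos : List Int) (out : String) : Prop := out = wellSelection_alt nx ny pos
instance (nx : Int) (ny : Int) (pos : List Int) (out : String) : Decidable (Spec_wellSelection nx ny pos out) := by unfold Spec_wellSelection; infer_instance

-- ===== CLAIM (what is proved, stated in full; the proofs are below) =====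
def Claim_equal_wellSelection : Prop := ∀ (nx : Int) (ny : Int) (pos : List Int), Dom_wellSelection nx ny pos → Pre_wellSelection nx ny pos → Spec_wellSelection nx ny pos (wellSelection nx ny pos)

-- ===== LEMMAS AND PROOFS =====

-- A's loop body, as a function of the current state and the value read from vals
def pvStep (acc : String × Nat × Nat) (v : Int) : String × Nat × Nat :=
  let bitMask := if v ≠ 0 then acc.2.2 ||| (1 <<< acc.2.1) else acc.2.2
  let bitCounter := acc.2.1 + 1
  if 6 < bitCounter then (acc.1.push (Char.ofNat (0x30 + bitMask)), 0, 0)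
  else (acc.1, bitCounter, bitMask)

-- the 7-bit mask of group g of a 0/1 list
def pvMask (l : List Int) (g : Nat) : Nat :=
  (List.range 7).foldl (fun mask b => if l.getD (7 * g + b) 0 ≠ 0 then mask ||| (1 <<< b) else mask) 0

theorem pv_push_append (s : String) (c : Char) (cs : List Char) :
    (s.push c) ++ String.ofList cs = s ++ String.ofList (c :: cs) := by
  apply String.toList_inj.mp; simp

theorem pv_mask_cons7 (a0 a1 a2 a3 a4 a5 a6 : Int) (rest : List Int) (g : Nat) :
    pvMask (a0::a1::a2::a3::a4::a5::a6::rest) (g + 1) = pvMask rest g := by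
  unfold pvMask
  have h : (fun (mask : Nat) (b : Nat) =>
      if (a0::a1::a2::a3::a4::a5::a6::rest).getD (7 * (g + 1) + b) 0 ≠ 0 then mask ||| (1 <<< b) else mask)
      = (fun (mask : Nat) (b : Nat) => if rest.getD (7 * g + b) 0 ≠ 0 then mask ||| (1 <<< b) else mask) := by
    funext mask b
    have h7 : 7 * (g + 1) + b = (7 * g + b) + 7 := by ring
    rw [h7]
    rfl
  rw [h]

theorem pv_step7 (s : String) (a0 a1 a2 a3 a4 a5 a6 : Int) :
    pvStep (pvStep (pvStep (pvStep (pvStep (pvStep (pvStep (s,0,0) a0) a1) a2) a3) a4) a5) a6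
      = (s.push (Char.ofNat (0x30 + pvMask [a0,a1,a2,a3,a4,a5,a6] 0)), 0, 0) := by
  rfl

theorem pv_chunks : ∀ (m : Nat) (l : List Int) (s : String), l.length = 7 * m →
    (if 0 < (l.foldl pvStep (s, 0, 0)).2.1
      then (l.foldl pvStep (s, 0, 0)).1.push (Char.ofNat (0x30 + (l.foldl pvStep (s, 0, 0)).2.2))
      else (l.foldl pvStep (s, 0, 0)).1)
    = s ++ String.ofList ((List.range m).map (fun g => Char.ofNat (0x30 + pvMask l g))) := by
  intro m
  induction m with
  | zero =>
    intro l s hl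
    have : l = [] := List.eq_nil_of_length_eq_zero (by omega)
    subst this
    apply String.toList_inj.mp; simp
  | succ m ih =>
    intro l s hl
    obtain ⟨a0,a1,a2,a3,a4,a5,a6,rest,rfl⟩ :
        ∃ a0 a1 a2 a3 a4 a5 a6 rest, l = a0::a1::a2::a3::a4::a5::a6::rest := by
      rcases l with _|⟨a0,_|⟨a1,_|⟨a2,_|⟨a3,_|⟨a4,_|⟨a5,_|⟨a6,l⟩⟩⟩⟩⟩⟩⟩ <;> simp at hl <;> try omega
      exact ⟨a0,a1,a2,a3,a4,a5,a6,l,rfl⟩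
    have hrest : rest.length = 7 * m := by simp at hl; omega
    simp only [List.foldl_cons]
    rw [pv_step7]
    rw [ih rest (s.push (Char.ofNat (0x30 + pvMask [a0,a1,a2,a3,a4,a5,a6] 0))) hrest]
    rw [List.range_succ_eq_map, List.map_cons, List.map_map]
    have h0 : pvMask [a0,a1,a2,a3,a4,a5,a6] 0 = pvMask (a0::a1::a2::a3::a4::a5::a6::rest) 0 := rfl
    have h1 : ((fun g => Char.ofNat (0x30 + pvMask (a0::a1::a2::a3::a4::a5::a6::rest) g)) ∘ Nat.succ)
        = (fun g => Char.ofNat (0x30 + pvMask rest g)) := by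
      funext g
      simp [Function.comp, pv_mask_cons7]
    rw [h0, h1, pv_push_append]

theorem pv_setfold_length (pos : List Int) : ∀ (l : List Int),
    (pos.foldl (fun l i => PySem.List.pySetD l i 1) l).length = l.length := by
  induction pos with
  | nil => intro l; rfl
  | cons i rest ih =>
    intro l
    simp only [List.foldl_cons]
    rw [ih, PySem.List.length_pySetD]

theorem pv_setfold_getD : ∀ (pos : List Int) (l : List Int) (j : Nat), j < l.length →
    (∀ i ∈ pos, 0 ≤ i ∧ i < (l.length : Int)) →
    (pos.foldl (fun l i => PySem.List.pySetD l i 1) l).getD j 0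
      = if ((j : Int) ∈ pos) then 1 else l.getD j 0 := by
  intro pos
  induction pos with
  | nil => intro l j _ _; simp
  | cons i rest ih =>
    intro l j hj hr
    have hi := hr i (List.mem_cons_self ..)
    simp only [List.foldl_cons]
    rw [ih (PySem.List.pySetD l i 1) j (by rw [PySem.List.length_pySetD]; exact hj)
        (by intro x hx; rw [PySem.List.length_pySetD]; exact hr x (List.mem_cons_of_mem _ hx))]
    rw [PySem.List.pySetD_of_nonneg _ _ hi.1]
    have hk : i.toNat < l.length := by omega
    have hjset : j < (l.set i.toNat 1).length := by simpa using hj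
    have hset : (l.set i.toNat 1).getD j 0 = if i.toNat = j then 1 else l.getD j 0 := by
      rw [List.getD_eq_getElem _ _ hjset, List.getElem_set]
      by_cases hkj : i.toNat = j
      · simp [hkj]
      · rw [if_neg hkj, if_neg hkj]
        exact (List.getD_eq_getElem _ _ hj).symm
    rw [hset]
    simp only [List.mem_cons]
    by_cases hm : (j : Int) ∈ rest
    · simp [hm]
    · by_cases he : (j : Int) = i
      · have : i.toNat = j := by omega
        simp [he, this]
      · have : ¬ i.toNat = j := by omega
        simp [he, this]

theorem wellSelection_eq_chunks (nx ny : Int) (pos : List Int) :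
    wellSelection nx ny pos
      = (pvFmt02x nx ++ pvFmt02x ny) ++ String.ofList
          ((List.range (PySem.Int.floordiv (nx * ny + 6) 7).toNat).map
            (fun g => Char.ofNat (0x30 + pvMask
              (pos.foldl (fun l i => PySem.List.pySetD l i 1)
                (List.replicate (7 * PySem.Int.floordiv (nx * ny + 6) 7).toNat 0)) g))) := by
  simp only [wellSelection]
  set vals0 : List Int := List.replicate (7 * PySem.Int.floordiv (nx * ny + 6) 7).toNat 0 with hv0
  set vals := pos.foldl (fun l i => PySem.List.pySetD l i 1) vals0 with hv
  have hlen : vals.length = 7 * (PySem.Int.floordiv (nx * ny + 6) 7).toNat := by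
    rw [hv, pv_setfold_length, hv0, List.length_replicate]
    omega
  have hloop : (PySem.List.pyRange 0 (vals.length : Int) 1).foldl
      (fun (acc : String × Nat × Nat) i =>
        let bitMask := if PySem.List.pyGetD vals i 0 ≠ 0 then acc.2.2 ||| (1 <<< acc.2.1) else acc.2.2
        let bitCounter := acc.2.1 + 1
        if 6 < bitCounter then (acc.1.push (Char.ofNat (0x30 + bitMask)), 0, 0)
        else (acc.1, bitCounter, bitMask))
      (pvFmt02x nx ++ pvFmt02x ny, 0, 0)
      = vals.foldl pvStep (pvFmt02x nx ++ pvFmt02x ny, 0, 0) :=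
    PySem.List.foldl_pyRange_zero_pyGetD' vals 0 pvStep _
  rw [hloop]
  exact pv_chunks _ vals _ hlen

-- B's dict loop, read at one group g, is a scalar OR-fold over pos
theorem pv_dictfold_getD (g : Int) : ∀ (pos : List Int) (d : PySem.Dict Int Nat),
    PySem.Dict.getD (pos.foldl (fun d i =>
        PySem.Dict.insert d (PySem.Int.floordiv i 7)
          ((PySem.Dict.getD d (PySem.Int.floordiv i 7) 0) ||| (1 <<< (PySem.Int.mod i 7).toNat))) d) g 0
      = pos.foldl (fun m i => if PySem.Int.floordiv i 7 = g then m ||| (1 <<< (PySem.Int.mod i 7).toNat) else m)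
          (PySem.Dict.getD d g 0) := by
  intro pos
  induction pos with
  | nil => intro d; rfl
  | cons i rest ih =>
    intro d
    simp only [List.foldl_cons]
    rw [ih]
    congr 1
    rw [PySem.Dict.getD_insert]
    by_cases h : PySem.Int.floordiv i 7 = g
    · rw [if_pos h.symm, if_pos h, h]
    · rw [if_neg (fun he => h he.symm), if_neg h]

-- testBit of a guarded-OR fold
theorem pv_testBit_orfold {α : Type} (c : α → Prop) [DecidablePred c] (e : α → Nat) :
    ∀ (l : List α) (m0 t : Nat),
    (l.foldl (fun m i => if c i then m ||| (1 <<< e i) else m) m0).testBit t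
      = (m0.testBit t || l.any (fun i => decide (c i) && (e i == t))) := by
  intro l
  induction l with
  | nil => intro m0 t; simp
  | cons a rest ih =>
    intro m0 t
    simp only [List.foldl_cons, List.any_cons]
    by_cases h : c a
    · rw [if_pos h, ih]
      have hbit : (1 <<< e a).testBit t = (e a == t) := by
        rw [Nat.shiftLeft_eq, one_mul, Nat.testBit_two_pow]
        by_cases he : e a = t
        · simp [he]
        · simp [he]
      simp [Nat.testBit_or, hbit, h, Bool.or_assoc, Bool.or_left_comm]
    · rw [if_neg h, ih]
      simp [h]

-- the two group masks agree
theorem pv_masks_agree (nx ny : Int) (pos : List Int)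
    (hpre : ∀ i ∈ pos, 0 ≤ i ∧ i < 7 * PySem.Int.floordiv (nx * ny + 6) 7)
    (g : Nat) (hg : g < (PySem.Int.floordiv (nx * ny + 6) 7).toNat) :
    pvMask (pos.foldl (fun l i => PySem.List.pySetD l i 1)
        (List.replicate (7 * PySem.Int.floordiv (nx * ny + 6) 7).toNat 0)) g
      = PySem.Dict.getD (pos.foldl (fun d i =>
          PySem.Dict.insert d (PySem.Int.floordiv i 7)
            ((PySem.Dict.getD d (PySem.Int.floordiv i 7) 0) ||| (1 <<< (PySem.Int.mod i 7).toNat)))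
          PySem.Dict.empty) (g : Int) 0 := by
  set q := PySem.Int.floordiv (nx * ny + 6) 7 with hq
  set vals0 : List Int := List.replicate (7 * q).toNat 0 with hv0
  set vals := pos.foldl (fun l i => PySem.List.pySetD l i 1) vals0 with hv
  have hlen0 : vals0.length = (7 * q).toNat := List.length_replicate
  have hq0 : 0 ≤ q := by omega
  have hpre' : ∀ i ∈ pos, 0 ≤ i ∧ i < (vals0.length : Int) := by
    intro i hi
    have := hpre i hi
    constructor
    · exact this.1
    · rw [hlen0]; omega
  have hval : ∀ (j : Nat), j < vals0.length → (vals.getD j 0 ≠ 0 ↔ (j : Int) ∈ pos) := by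
    intro j hj
    rw [hv, pv_setfold_getD pos vals0 j hj hpre']
    by_cases hm : (j : Int) ∈ pos
    · simp [hm]
    · simp [hm, hv0]
  apply Nat.eq_of_testBit_eq
  intro t
  rw [pv_dictfold_getD]
  unfold pvMask
  rw [pv_testBit_orfold (fun b => vals.getD (7 * g + b) 0 ≠ 0) (fun b => b),
      pv_testBit_orfold (fun i => PySem.Int.floordiv i 7 = (g : Int)) (fun i => (PySem.Int.mod i 7).toNat)]
  simp only [PySem.Dict.getD_empty, Nat.zero_testBit, Bool.false_or]
  rw [Bool.eq_iff_iff]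
  simp only [List.any_eq_true, List.mem_range, decide_eq_true_eq, Bool.and_eq_true, beq_iff_eq]
  constructor
  · rintro ⟨b, hb7, hsel, rfl⟩
    have hjlen : 7 * g + b < vals0.length := by rw [hlen0]; omega
    have hmem : ((7 * g + b : Nat) : Int) ∈ pos := (hval _ hjlen).mp hsel
    refine ⟨((7 * g + b : Nat) : Int), hmem, ?_, ?_⟩
    · rw [PySem.Int.floordiv_eq_ediv_of_pos (by norm_num)]
      push_cast
      omega
    · rw [PySem.Int.mod_eq_emod_of_pos (by norm_num)]
      push_cast
      omega
  · rintro ⟨i, hi, hdiv, hmod⟩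
    have hnn := (hpre i hi).1
    have hmb : 0 ≤ PySem.Int.mod i 7 ∧ PySem.Int.mod i 7 < 7 :=
      ⟨PySem.Int.mod_nonneg _ (by norm_num), PySem.Int.mod_lt _ (by norm_num)⟩
    have hrec := PySem.Int.floordiv_mul_add_mod i 7
    have ht7 : t < 7 := by omega
    refine ⟨t, ht7, ?_, rfl⟩
    have hieq : i = ((7 * g + t : Nat) : Int) := by
      push_cast
      omega
    exact (hval (7 * g + t) (by rw [hlen0]; omega)).mpr (hieq ▸ hi)

-- ===== VERDICT (by name: the statement is the Claim_ definition above) =====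
theorem wellSelection_spec : Claim_equal_wellSelection := by
  intro nx ny pos _ hpre
  unfold Spec_wellSelection
  rw [wellSelection_eq_chunks]
  simp only [wellSelection_alt]
  rw [PySem.List.pyRange_one]
  simp only [sub_zero, zero_add, List.map_map]
  congr 1
  congr 1
  apply List.map_congr_left
  intro g hg
  have hgm : g < (PySem.Int.floordiv (nx * ny + 6) 7).toNat := List.mem_range.mp hg
  simp only [Function.comp]
  rw [pv_masks_agree nx ny pos hpre g hgm]
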